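-- pv_equiv track=rewrite | github.com/sebastiansb2031/Mind_map_inkscape_Simpcript | Control_archivo.py | intercambiar_matrices
-- ===== SOURCE A (Python) =====
-- def intercambiar_matrices(matriz1,matriz2):
--  matriz1c=[]
--  matriz2c=[]
--  alv=[]
--  for i in range(len(matriz1)):
--   matriz1c.append(int(matriz1[i]))
--  for i in range(len(matriz1)):
--   for j in range(len(matriz1)):
--    if matriz2[i]==matriz1c[j]:
--     matriz2c.append(j)
--     j=len(matriz1)
--  return matriz2c
-- ===== SOURCE B (Python) =====
-- def intercambiar_matrices(matriz1, matriz2):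
--     indices = {}
--     for j, v in enumerate(matriz1):
--         indices.setdefault(int(v), []).append(j)
--     matriz2c = []
--     for x in matriz2[:len(matriz1)]:
--         matriz2c.extend(indices.get(x, []))
--     return matriz2c
-- ===== Notes on version B (the rewrite author's own statement) =====
-- stated objective: faster
-- what changed: Replaces A's nested scan of matriz1 for every element of matriz2 (the 'j = len' line never breaks, so ALL matching indices are collected) by a dict from value to its list of indices in matriz1 built once with enumerate/setdefault, then a single lookup per element of matriz2[:len(matriz1)]; intended as faster (O(n + output) vs O(n^2) scan work) — measured 4.31x at n=4096, unconfirmed at the largest size because on duplicate-heavy inputs the OUTPUT itself is quadratic and both programs hit the limit.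
-- crash fix: When matriz2 is shorter than matriz1, A raises IndexError on matriz2[i]; B returns the mapped indices for the elements matriz2 does have (e.g. B([1,2,1],[2]) = [1]). — e.g. on intercambiar_matrices([1, 2, 1], [2]): A raises IndexError, B returns [1]
import Mathlib
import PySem

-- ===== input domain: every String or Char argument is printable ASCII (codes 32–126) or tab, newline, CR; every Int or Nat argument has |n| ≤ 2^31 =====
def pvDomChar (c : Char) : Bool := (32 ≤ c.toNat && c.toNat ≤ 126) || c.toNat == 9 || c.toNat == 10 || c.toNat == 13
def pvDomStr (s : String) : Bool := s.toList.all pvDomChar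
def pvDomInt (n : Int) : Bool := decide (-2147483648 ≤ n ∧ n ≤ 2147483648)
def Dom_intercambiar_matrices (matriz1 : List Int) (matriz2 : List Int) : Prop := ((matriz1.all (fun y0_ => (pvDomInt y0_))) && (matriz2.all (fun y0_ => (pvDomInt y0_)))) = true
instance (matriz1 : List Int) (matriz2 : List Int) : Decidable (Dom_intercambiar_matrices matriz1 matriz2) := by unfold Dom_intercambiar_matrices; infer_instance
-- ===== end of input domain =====

-- B replaces A's quadratic nested index scan by a dictionary value -> list of indices built once over matriz1, then one lookup per element of matriz2 (objective: faster; intended asymptotic, measured 4.31x at n=4096).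

-- ===== PORT A =====
def intercambiar_matrices (matriz1 : List Int) (matriz2 : List Int) : List Int :=
  -- matriz1c: first loop, appends int(matriz1[i]) (identity on Int)
  let matriz1c := (PySem.List.pyRange 0 (matriz1.length : Int) 1).foldl
    (fun acc i => acc ++ [PySem.List.pyGetD matriz1 i 0]) []
  -- nested loops; the 'j = len(matriz1)' line rebinds the loop variable and never breaks,
  -- so every matching j is appended — transliterated as-is
  (PySem.List.pyRange 0 (matriz1.length : Int) 1).foldl
    (fun matriz2c i =>
      (PySem.List.pyRange 0 (matriz1.length : Int) 1).foldl
        (fun acc j =>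
          if PySem.List.pyGetD matriz2 i 0 = PySem.List.pyGetD matriz1c j 0 then acc ++ [j]
          else acc)
        matriz2c)
    []

-- ===== PORT B =====
def intercambiar_matrices_alt (matriz1 : List Int) (matriz2 : List Int) : List Int :=
  -- indices = {}; for j, v in enumerate(matriz1): indices.setdefault(int(v), []).append(j)
  let indices : PySem.Dict Int (List Int) :=
    (PySem.List.enumerate matriz1 0).foldl (fun d p => d.modify p.2 [] (· ++ [p.1]))
      PySem.Dict.empty
  -- for x in matriz2[:len(matriz1)]: matriz2c.extend(indices.get(x, []))
  (PySem.List.slice matriz2 none (some (matriz1.length : Int))).foldl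
    (fun acc x => acc ++ indices.getD x []) []

-- ===== PRECONDITION & SPEC =====
-- A reads matriz2[i] for every i < len(matriz1), so it raises IndexError when matriz2 is shorter than matriz1; Pre_ excludes exactly those inputs.
def Pre_intercambiar_matrices (matriz1 : List Int) (matriz2 : List Int) : Prop :=
  matriz1.length ≤ matriz2.length
instance (matriz1 : List Int) (matriz2 : List Int) : Decidable (Pre_intercambiar_matrices matriz1 matriz2) := by unfold Pre_intercambiar_matrices; infer_instance
def pvWitness_intercambiar_matrices : List Int × List Int := ([1, 2], [2, 1, 3])

-- When matriz2 is shorter than matriz1, A raises IndexError while B returns the mapped indices for the elements matriz2 does have.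
def Raises_intercambiar_matrices (matriz1 : List Int) (matriz2 : List Int) : Prop :=
  matriz2.length < matriz1.length
instance (matriz1 : List Int) (matriz2 : List Int) : Decidable (Raises_intercambiar_matrices matriz1 matriz2) := by unfold Raises_intercambiar_matrices; infer_instance
def pvRaiseWitness_intercambiar_matrices : List Int × List Int := ([1, 2, 1], [2])
def pvRaiseWitnessOut_intercambiar_matrices : List Int := [1]

def Spec_intercambiar_matrices (matriz1 : List Int) (matriz2 : List Int) (out : List Int) : Prop := out = intercambiar_matrices_alt matriz1 matriz2
instance (matriz1 : List Int) (matriz2 : List Int) (out : List Int) : Decidable (Spec_intercambiar_matrices matriz1 matriz2 out) := by unfold Spec_intercambiar_matrices; infer_instance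

-- ===== CLAIM (what is proved, stated in full; the proofs are below) =====
def Claim_equal_intercambiar_matrices : Prop := ∀ (matriz1 : List Int) (matriz2 : List Int), Dom_intercambiar_matrices matriz1 matriz2 → Pre_intercambiar_matrices matriz1 matriz2 → Spec_intercambiar_matrices matriz1 matriz2 (intercambiar_matrices matriz1 matriz2)
def Claim_raises_intercambiar_matrices : Prop := (∀ (matriz1 : List Int) (matriz2 : List Int), Dom_intercambiar_matrices matriz1 matriz2 → Raises_intercambiar_matrices matriz1 matriz2 → ¬ Pre_intercambiar_matrices matriz1 matriz2) ∧ (Dom_intercambiar_matrices (pvRaiseWitness_intercambiar_matrices.1) (pvRaiseWitness_intercambiar_matrices.2) ∧ Raises_intercambiar_matrices (pvRaiseWitness_intercambiar_matrices.1) (pvRaiseWitness_intercambiar_matrices.2) ∧ intercambiar_matrices_alt (pvRaiseWitness_intercambiar_matrices.1) (pvRaiseWitness_intercambiar_matrices.2) = pvRaiseWitnessOut_intercambiar_matrices)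

-- ===== LEMMAS AND PROOFS =====

-- the list of indices j (in order) with matriz1[j] = x; both ports are shown to produce
-- (matriz2.take matriz1.length).flatMap (idxList matriz1)
def idxList (m1 : List Int) (x : Int) : List Int :=
  ((PySem.List.enumerate m1 0).filter (fun p => p.2 == x)).map (·.1)

theorem enum_append (ys : List Int) (y : Int) (s : Int) :
    PySem.List.enumerate (ys ++ [y]) s = PySem.List.enumerate ys s ++ [(s + ys.length, y)] := by
  induction ys generalizing s with
  | nil => simp [PySem.List.enumerate]
  | cons z zs ih => simp [PySem.List.enumerate, ih, add_assoc]; ring_nf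

-- A's inner loop over j collects exactly idxList m1 x
theorem A_inner (m1 : List Int) (x : Int) (acc : List Int) :
    (PySem.List.pyRange 0 (m1.length : Int) 1).foldl
      (fun a j => if x = PySem.List.pyGetD m1 j 0 then a ++ [j] else a) acc
    = acc ++ idxList m1 x := by
  induction m1 using List.reverseRecOn generalizing acc with
  | nil => simp [PySem.List.pyRange_one_eq_nil, idxList, PySem.List.enumerate]
  | append_singleton ys y ih =>
    have hlen : ((ys ++ [y]).length : Int) = (ys.length : Int) + 1 := by simp
    rw [hlen, PySem.List.pyRange_one_succ_right (by positivity), List.foldl_append]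
    have hbody : ∀ (a : List Int), ∀ j ∈ PySem.List.pyRange 0 (ys.length : Int) 1,
        (if x = PySem.List.pyGetD (ys ++ [y]) j 0 then a ++ [j] else a)
        = (if x = PySem.List.pyGetD ys j 0 then a ++ [j] else a) := by
      intro a j hj
      rw [PySem.List.mem_pyRange_one] at hj
      rw [PySem.List.pyGetD_eq_getElem _ _ hj.1 (by simp; omega),
          PySem.List.pyGetD_eq_getElem _ _ hj.1 (by exact_mod_cast hj.2),
          List.getElem_append_left (by omega)]
    rw [PySem.List.foldl_congr_mem _ _ _ acc hbody, ih]
    have hy : PySem.List.pyGetD (ys ++ [y]) (ys.length : Int) 0 = y := by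
      rw [PySem.List.pyGetD_eq_getElem _ _ (by positivity) (by simp)]
      simp
    simp only [List.foldl_cons, List.foldl_nil, hy, idxList, enum_append, List.filter_append,
      List.map_append, zero_add]
    by_cases hxy : x = y
    · simp [hxy, List.append_assoc]
    · simp [hxy, Ne.symm hxy]

-- the index loop over range(len(matriz1)) reads exactly matriz2.take matriz1.length
theorem take_map (m2 : List Int) (n : Nat) (h : n ≤ m2.length) :
    (PySem.List.pyRange 0 (n : Int) 1).map (fun i => PySem.List.pyGetD m2 i 0) = m2.take n := by
  rw [PySem.List.pyRange_zero_nat, List.map_map]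
  apply List.ext_getElem (by simp [h])
  intro i h1 h2
  simp only [List.getElem_map, List.getElem_range, Function.comp_apply, List.getElem_take]
  rw [PySem.List.pyGetD_eq_getElem _ _ (by positivity) (by simp at h1 ⊢; omega)]
  simp

-- B's grouping dict looks up to idxList
theorem B_getD (m1 : List Int) (x : Int) :
    ((PySem.List.enumerate m1 0).foldl (fun d p => d.modify p.2 [] (· ++ [p.1]))
      PySem.Dict.empty).getD x [] = idxList m1 x := by
  rw [show ((PySem.List.enumerate m1 0).foldl (fun d p => d.modify p.2 [] (· ++ [p.1]))
        PySem.Dict.empty)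
      = (((PySem.List.enumerate m1 0).map (fun p => (p.2, p.1))).foldl
          (fun d q => d.modify q.1 [] (· ++ [q.2])) PySem.Dict.empty) from by rw [List.foldl_map]]
  rw [PySem.Dict.getD_foldl_modify_append, List.filter_map, List.map_map]
  simp [idxList, Function.comp_def]

theorem main_eq (m1 m2 : List Int) (h : m1.length ≤ m2.length) :
    intercambiar_matrices m1 m2 = intercambiar_matrices_alt m1 m2 := by
  unfold intercambiar_matrices intercambiar_matrices_alt
  simp only [PySem.List.foldl_append_singleton_eq_map, List.nil_append,
    PySem.List.map_pyGetD_pyRange_zero']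
  have hbody : ∀ (acc : List Int), ∀ i ∈ PySem.List.pyRange 0 (m1.length : Int) 1,
      (PySem.List.pyRange 0 (m1.length : Int) 1).foldl
        (fun a j => if PySem.List.pyGetD m2 i 0 = PySem.List.pyGetD m1 j 0 then a ++ [j] else a)
        acc
      = acc ++ idxList m1 (PySem.List.pyGetD m2 i 0) := fun acc i _ => A_inner m1 _ acc
  rw [PySem.List.foldl_congr_mem _ _ _ [] hbody,
      PySem.List.foldl_append_eq_flatMap, PySem.List.slice_to_natCast]
  have hB : ∀ x, ((PySem.List.enumerate m1 0).foldl (fun d p => d.modify p.2 [] (· ++ [p.1]))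
      PySem.Dict.empty).getD x [] = idxList m1 x := B_getD m1
  simp only [hB]
  rw [PySem.List.foldl_append_eq_flatMap, ← take_map m2 m1.length h]
  simp [List.flatMap_def, List.map_map, Function.comp_def]

-- ===== VERDICT (by name: the statement is the Claim_ definition above) =====
theorem intercambiar_matrices_spec : Claim_equal_intercambiar_matrices := by
  intro m1 m2 _ hpre
  exact main_eq m1 m2 hpre

theorem intercambiar_matrices_raises : Claim_raises_intercambiar_matrices := by
  unfold Claim_raises_intercambiar_matrices
  exact ⟨fun m1 m2 _ hr hp => by
    unfold Raises_intercambiar_matrices at hr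
    unfold Pre_intercambiar_matrices at hp
    omega, by decide⟩

-- witness self-check: B's port really returns the stated value at the raise witness
theorem intercambiar_matrices_raises_ok :
    intercambiar_matrices_alt pvRaiseWitness_intercambiar_matrices.1
      pvRaiseWitness_intercambiar_matrices.2 = pvRaiseWitnessOut_intercambiar_matrices :=
  intercambiar_matrices_raises.2.2.2
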